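-- pv_equiv track=rewrite | github.com/houfu/sglawwatch-zeeker | resources/about_singapore_law.py | group_pseudo_list_items
-- ===== SOURCE A (Python) =====
-- from typing import Any, Dict, List, Optional
--
-- def is_likely_list_item(text: str) -> bool:
--     """Check if a paragraph text looks like it should be a list item."""
--     # Check for common list item patterns
--     stripped_text = text.strip()
--
--     # Starts with "the " and is likely a continuation of a list
--     if stripped_text.lower().startswith("the ") and len(stripped_text) > 20:
--         # Look for patterns common in legal list items
--         legal_patterns = [
--             "veto against",
--             "appointment of",
--             "concurrence with",
--             "withholding of",
--             "exercise of",
--             "approval of",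
--             "consent to",
--             "power to",
--             "authority to",
--             "right to",
--             "duty to",
--             "responsibility for",
--         ]
--         return any(pattern in stripped_text.lower() for pattern in legal_patterns)
--
--     return False
--
-- def group_pseudo_list_items(content_parts: List[Dict[str, Any]]) -> List[Dict[str, Any]]:
--     """Group consecutive paragraphs that should be list items into a single list."""
--     if not content_parts:
--         return content_parts
--
--     result = []
--     i = 0
--
--     while i < len(content_parts):
--         current = content_parts[i]
--
--         if current["type"] == "paragraph":
--             # Look ahead to see if we have consecutive list-like items
--             list_items = []
--             j = i
--
--             # Collect consecutive list-like paragraphs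
--             while (
--                 j < len(content_parts)
--                 and content_parts[j]["type"] == "paragraph"
--                 and is_likely_list_item(content_parts[j]["text"])
--             ):
--                 list_items.append(content_parts[j]["text"])
--                 j += 1
--
--             if len(list_items) >= 2:  # At least 2 consecutive list items
--                 # Create a combined list
--                 list_text = "\n".join(f"• {item}" for item in list_items)
--                 result.append(
--                     {
--                         "text": list_text,
--                         "type": "list",
--                         "original_text": " ".join(
--                             item["original_text"] for item in content_parts[i:j]
--                         ),
--                     }
--                 )
--                 i = j  # Skip the items we just processed
--             else:
--                 # Regular paragraph, keep as is
--                 result.append(current)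
--                 i += 1
--         else:
--             # Non-paragraph, keep as is
--             result.append(current)
--             i += 1
--
--     return result
-- ===== SOURCE B (Python) =====
-- from typing import Any, Dict, List
--
--
-- def is_likely_list_item(text: str) -> bool:
--     """Check if a paragraph text looks like it should be a list item."""
--     stripped_text = text.strip()
--     if stripped_text.lower().startswith("the ") and len(stripped_text) > 20:
--         legal_patterns = [
--             "veto against",
--             "appointment of",
--             "concurrence with",
--             "withholding of",
--             "exercise of",
--             "approval of",
--             "consent to",
--             "power to",
--             "authority to",
--             "right to",
--             "duty to",
--             "responsibility for",
--         ]
--         return any(pattern in stripped_text.lower() for pattern in legal_patterns)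
--     return False
--
--
-- def _flush(pending: List[Dict[str, Any]]) -> List[Dict[str, Any]]:
--     """Turn a completed run of list-like paragraphs into output items."""
--     if len(pending) >= 2:
--         return [
--             {
--                 "text": "\n".join(f"• {p['text']}" for p in pending),
--                 "type": "list",
--                 "original_text": " ".join(p["original_text"] for p in pending),
--             }
--         ]
--     return list(pending)
--
--
-- def group_pseudo_list_items(content_parts: List[Dict[str, Any]]) -> List[Dict[str, Any]]:
--     """Group consecutive paragraphs that should be list items into a single list.
--
--     Walks the input back-to-front, keeping the run of list-like paragraphs that
--     starts at the current position in `pending` and prepending finished output.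
--     """
--     if not content_parts:
--         return content_parts
--
--     out: List[Dict[str, Any]] = []
--     pending: List[Dict[str, Any]] = []
--     for part in reversed(content_parts):
--         if part["type"] == "paragraph" and is_likely_list_item(part["text"]):
--             pending = [part] + pending
--         else:
--             out = [part] + _flush(pending) + out
--             pending = []
--     return _flush(pending) + out
-- ===== Notes on version B (the rewrite author's own statement) =====
-- stated objective: alternative
-- what changed: Replaces A's forward index walk with an inner look-ahead scan and index skipping by a single reverse traversal that carries the run of list-like paragraphs starting at the current position in a 'pending' accumulator and builds the output back-to-front, flushing each finished run as one merged item (>=2) or unchanged.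
import Mathlib
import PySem

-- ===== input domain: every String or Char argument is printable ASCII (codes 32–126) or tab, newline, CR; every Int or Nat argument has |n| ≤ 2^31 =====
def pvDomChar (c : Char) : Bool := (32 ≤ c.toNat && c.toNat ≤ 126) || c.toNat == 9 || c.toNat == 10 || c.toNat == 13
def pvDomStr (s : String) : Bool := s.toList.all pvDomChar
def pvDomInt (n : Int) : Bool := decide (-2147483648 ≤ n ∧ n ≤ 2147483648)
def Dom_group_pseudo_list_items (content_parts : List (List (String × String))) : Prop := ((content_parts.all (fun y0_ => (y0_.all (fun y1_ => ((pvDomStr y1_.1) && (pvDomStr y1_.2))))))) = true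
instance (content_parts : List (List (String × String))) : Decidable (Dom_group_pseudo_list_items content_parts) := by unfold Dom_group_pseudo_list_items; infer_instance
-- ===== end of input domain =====

-- B replaces A's forward index walk with look-ahead by one reverse traversal carrying a pending-run accumulator and building the output back-to-front; alternative decomposition, same return values. A raises KeyError on parts missing the keys it reads; Pre_ excludes exactly those.


-- ===== PORT A =====
-- part["k"]: first-match lookup in the association list; the "" default is never
-- reached under Pre_ (Python raises KeyError there, which Pre_ excludes).
def dget (p : List (String × String)) (k : String) : String :=
  ((p.find? (fun kv => kv.1 == k)).map (·.2)).getD ""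

def legalPatterns : List String :=
  ["veto against", "appointment of", "concurrence with", "withholding of",
   "exercise of", "approval of", "consent to", "power to", "authority to",
   "right to", "duty to", "responsibility for"]

def is_likely_list_item (text : String) : Bool :=
  let stripped := PySem.Str.strip text
  if PySem.Str.startswith (PySem.Str.lower stripped) "the " && PySem.Str.len stripped > 20 then
    legalPatterns.any (fun pat => PySem.Str.isIn pat (PySem.Str.lower stripped))
  else
    false

-- the inner while loop: collect the texts of consecutive list-like paragraphs from index j
def aCollect (cps : List (List (String × String))) (j : Nat) : List String :=
  if h : j < cps.length then
    if dget cps[j] "type" == "paragraph" && is_likely_list_item (dget cps[j] "text") then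
      dget cps[j] "text" :: aCollect cps (j + 1)
    else []
  else []
termination_by cps.length - j
decreasing_by exact Nat.sub_lt_sub_left h (Nat.lt_succ_self j)

-- the outer while loop, with its result accumulator
def aLoop (cps : List (List (String × String))) (i : Nat)
    (result : List (List (String × String))) : List (List (String × String)) :=
  if h : i < cps.length then
    if dget cps[i] "type" == "paragraph" then
      if h2 : (aCollect cps i).length ≥ 2 then
        aLoop cps (i + (aCollect cps i).length)
          (result ++ [[("text", PySem.Str.join "\n" ((aCollect cps i).map (fun item => "• " ++ item))),
                       ("type", "list"),
                       ("original_text", PySem.Str.join " "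
                         ((PySem.List.slice cps (some (i : Int)) (some ((i : Int) + ((aCollect cps i).length : Int)))).map
                           (fun p => dget p "original_text")))]])
      else
        aLoop cps (i + 1) (result ++ [cps[i]])
    else
      aLoop cps (i + 1) (result ++ [cps[i]])
  else result
termination_by cps.length - i
decreasing_by
  · exact Nat.sub_lt_sub_left h (Nat.lt_add_of_pos_right (Nat.lt_of_lt_of_le Nat.zero_lt_two h2))
  · exact Nat.sub_lt_sub_left h (Nat.lt_succ_self i)
  · exact Nat.sub_lt_sub_left h (Nat.lt_succ_self i)

def group_pseudo_list_items (content_parts : List (List (String × String))) : List (List (String × String)) :=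
  if content_parts = [] then content_parts else aLoop content_parts 0 []

-- ===== PORT B =====
-- the key: part["type"] == "paragraph" and is_likely_list_item(part["text"])
def keyB (p : List (String × String)) : Bool :=
  dget p "type" == "paragraph" && is_likely_list_item (dget p "text")

-- _flush: a completed run becomes one merged item (length ≥ 2) or passes through
def flushB (pending : List (List (String × String))) : List (List (String × String)) :=
  if pending.length ≥ 2 then
    [[("text", PySem.Str.join "\n" (pending.map (fun p => "• " ++ dget p "text"))),
      ("type", "list"),
      ("original_text", PySem.Str.join " " (pending.map (fun p => dget p "original_text")))]]
  else pending

-- the reverse for-loop: state = (pending, out), output built back-to-front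
def group_pseudo_list_items_alt (content_parts : List (List (String × String))) : List (List (String × String)) :=
  if content_parts = [] then content_parts else
  let st := content_parts.reverse.foldl
    (fun (st : List (List (String × String)) × List (List (String × String))) part =>
      if keyB part then (part :: st.1, st.2)
      else ([], part :: (flushB st.1 ++ st.2))) ([], [])
  flushB st.1 ++ st.2

-- ===== PRECONDITION & SPEC =====
def hasKey (p : List (String × String)) (k : String) : Bool :=
  (p.find? (fun kv => kv.1 == k)).isSome

-- Exactly the inputs on which the Python A returns (no KeyError): every part has a
-- "type" key, every paragraph has a "text" key, and every part lying in a run of ≥ 2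
-- consecutive list-like paragraphs (i.e. adjacent to another list-like paragraph)
-- has an "original_text" key — those are precisely the keys A's traversal reads.
def Pre_group_pseudo_list_items (content_parts : List (List (String × String))) : Prop :=
  (content_parts.all (fun p => hasKey p "type" && (!(dget p "type" == "paragraph") || hasKey p "text"))
   && (content_parts.zip content_parts.tail).all
        (fun ab => !(keyB ab.1 && keyB ab.2) || (hasKey ab.1 "original_text" && hasKey ab.2 "original_text"))) = true

instance (content_parts : List (List (String × String))) : Decidable (Pre_group_pseudo_list_items content_parts) := by
  unfold Pre_group_pseudo_list_items; infer_instance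

def pvWitness_group_pseudo_list_items : (List (List (String × String))) :=
  [[("type", "heading")]]

def Spec_group_pseudo_list_items (content_parts : List (List (String × String))) (out : List (List (String × String))) : Prop := out = group_pseudo_list_items_alt content_parts
instance (content_parts : List (List (String × String))) (out : List (List (String × String))) : Decidable (Spec_group_pseudo_list_items content_parts out) := by unfold Spec_group_pseudo_list_items; infer_instance

-- ===== CLAIM (what is proved, stated in full; the proofs are below) =====
def Claim_equal_group_pseudo_list_items : Prop := ∀ (content_parts : List (List (String × String))), Dom_group_pseudo_list_items content_parts → Pre_group_pseudo_list_items content_parts → Spec_group_pseudo_list_items content_parts (group_pseudo_list_items content_parts)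

-- ===== LEMMAS AND PROOFS =====
-- what one maximal run contributes to the output, given its key value
def procGroup (kg : Bool × List (List (String × String))) : List (List (String × String)) :=
  if kg.1 && decide (kg.2.length ≥ 2) then
    [[("text", PySem.Str.join "\n" (kg.2.map (fun p => "• " ++ dget p "text"))),
      ("type", "list"),
      ("original_text", PySem.Str.join " " (kg.2.map (fun p => dget p "original_text")))]]
  else kg.2

-- itertools-groupby view of the common specification
def pyGroupby {α : Type} (key : α → Bool) : List α → List (Bool × List α)
  | [] => []
  | p :: rest =>
    (key p, p :: rest.takeWhile (fun x => key x == key p)) ::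
      pyGroupby key (rest.dropWhile (fun x => key x == key p))
termination_by l => l.length
decreasing_by
  simp only [List.length_cons]
  exact Nat.lt_succ_of_le (List.length_dropWhile_le _ rest)

def bodySpec (l : List (List (String × String))) : List (List (String × String)) :=
  (pyGroupby keyB l).flatMap procGroup

theorem take_tw {a : Type} (p : a → Bool) (l : List a) :
    l.take (l.takeWhile p).length = l.takeWhile p := by
  nth_rewrite 2 [← List.takeWhile_append_dropWhile (p := p) (l := l)]
  exact List.take_left' rfl

theorem drop_tw {a : Type} (p : a → Bool) (l : List a) :
    l.drop (l.takeWhile p).length = l.dropWhile p := by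
  nth_rewrite 2 [← List.takeWhile_append_dropWhile (p := p) (l := l)]
  exact List.drop_left' rfl

theorem dw_of_tw_nil {a : Type} (p : a → Bool) (l : List a) (h : l.takeWhile p = []) :
    l.dropWhile p = l := by
  have h2 := List.takeWhile_append_dropWhile (p := p) (l := l)
  rw [h] at h2; simpa using h2

theorem aCollect_eq (cps : List (List (String × String))) (j : Nat) :
    aCollect cps j = ((cps.drop j).takeWhile keyB).map (fun p => dget p "text") := by
  fun_induction aCollect with
  | case1 j h hk ih =>
    have hk' : keyB cps[j] = true := hk
    rw [List.drop_eq_getElem_cons h, List.takeWhile_cons_of_pos hk', List.map_cons]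
    exact congrArg₂ List.cons rfl ih
  | case2 j h hk =>
    have hk' : ¬ keyB cps[j] = true := hk
    rw [List.drop_eq_getElem_cons h, List.takeWhile_cons_of_neg hk']
    rfl
  | case3 j h =>
    rw [List.drop_eq_nil_iff.mpr (by omega)]
    rfl

theorem bodySpec_nil : bodySpec [] = [] := by
  simp [bodySpec, pyGroupby]

theorem bodySpec_cons_true (c : List (String × String)) (rest : List (List (String × String)))
    (hc : keyB c = true) :
    bodySpec (c :: rest) =
      procGroup (true, c :: rest.takeWhile keyB) ++ bodySpec (rest.dropWhile keyB) := by
  have hpred : (fun x => keyB x == keyB c) = keyB := by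
    funext x; rw [hc]; cases keyB x <;> rfl
  simp only [bodySpec]
  rw [pyGroupby, hpred, hc, List.flatMap_cons]

theorem falseRun (l : List (List (String × String))) :
    l.takeWhile (fun x => !keyB x) ++ bodySpec (l.dropWhile (fun x => !keyB x)) = bodySpec l := by
  cases l with
  | nil => simp
  | cons h t =>
    cases hk : keyB h with
    | true =>
      rw [List.takeWhile_cons_of_neg (by simp [hk]), List.dropWhile_cons_of_neg (by simp [hk])]
      simp
    | false =>
      rw [List.takeWhile_cons_of_pos (by simp [hk]), List.dropWhile_cons_of_pos (by simp [hk])]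
      have hpred : (fun x => keyB x == keyB h) = (fun x => !keyB x) := by
        funext x; rw [hk]; cases keyB x <;> rfl
      simp only [bodySpec]
      rw [pyGroupby, hpred, hk, List.flatMap_cons]
      rw [show procGroup (false, h :: t.takeWhile (fun x => !keyB x))
            = h :: t.takeWhile (fun x => !keyB x) from by simp [procGroup]]

theorem bodySpec_cons_false (c : List (String × String)) (rest : List (List (String × String)))
    (hc : keyB c = false) :
    bodySpec (c :: rest) = c :: bodySpec rest := by
  have hpred : (fun x => keyB x == keyB c) = (fun x => !keyB x) := by
    funext x; rw [hc]; cases keyB x <;> rfl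
  conv_lhs => rw [bodySpec, pyGroupby, hpred, hc]
  rw [List.flatMap_cons]
  rw [show procGroup (false, c :: rest.takeWhile (fun x => !keyB x))
        = c :: rest.takeWhile (fun x => !keyB x) from by simp [procGroup]]
  rw [List.cons_append]
  exact congrArg (c :: ·) (falseRun rest)

theorem aLoop_eq (cps : List (List (String × String))) (i : Nat)
    (result : List (List (String × String))) :
    aLoop cps i result = result ++ bodySpec (cps.drop i) := by
  fun_induction aLoop with
  | case1 i result h hp h2 ih =>
    have hitems : aCollect cps i = ((cps.drop i).takeWhile keyB).map (fun p => dget p "text") :=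
      aCollect_eq cps i
    have hL : cps.drop i = cps[i] :: cps.drop (i + 1) := List.drop_eq_getElem_cons h
    have hlen : (aCollect cps i).length = ((cps.drop i).takeWhile keyB).length := by
      rw [hitems, List.length_map]
    have hk : keyB cps[i] = true := by
      by_contra hkf
      have hnil : (cps.drop i).takeWhile keyB = [] := by
        rw [hL, List.takeWhile_cons_of_neg hkf]
      rw [hnil] at hlen
      simp only [List.length_nil] at hlen
      omega
    have htw : (cps.drop i).takeWhile keyB = cps[i] :: (cps.drop (i + 1)).takeWhile keyB := by
      rw [hL, List.takeWhile_cons_of_pos hk]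
    have hdw : (cps.drop i).dropWhile keyB = (cps.drop (i + 1)).dropWhile keyB := by
      rw [hL, List.dropWhile_cons_of_pos hk]
    have hdrop : cps.drop (i + (aCollect cps i).length) = (cps.drop i).dropWhile keyB := by
      rw [← drop_tw keyB (cps.drop i), List.drop_drop, ← hlen]
    have hbody : bodySpec (cps.drop i)
        = procGroup (true, (cps.drop i).takeWhile keyB) ++ bodySpec ((cps.drop i).dropWhile keyB) := by
      conv_lhs => rw [hL]
      rw [bodySpec_cons_true _ _ hk, ← htw, ← hdw]
    have hproc : procGroup (true, (cps.drop i).takeWhile keyB)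
        = [[("text", PySem.Str.join "\n" ((aCollect cps i).map (fun item => "• " ++ item))),
            ("type", "list"),
            ("original_text", PySem.Str.join " "
              ((PySem.List.slice cps (some (i : Int)) (some ((i : Int) + ((aCollect cps i).length : Int)))).map
                (fun p => dget p "original_text")))]] := by
      rw [procGroup, if_pos (by simp only [Bool.true_and, decide_eq_true_eq]; omega)]
      have ht : (aCollect cps i).map (fun item => "• " ++ item)
          = ((cps.drop i).takeWhile keyB).map (fun p => "• " ++ dget p "text") := by
        rw [hitems, List.map_map]; rfl
      have hsl : PySem.List.slice cps (some (i : Int)) (some ((i : Int) + ((aCollect cps i).length : Int)))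
          = (cps.drop i).takeWhile keyB := by
        rw [PySem.List.slice_natCast_add, hlen, take_tw]
      rw [ht, hsl]
    rw [ih, hdrop, hbody, hproc]
    simp
  | case2 i result h hp h2 ih =>
    have hitems : aCollect cps i = ((cps.drop i).takeWhile keyB).map (fun p => dget p "text") :=
      aCollect_eq cps i
    have hL : cps.drop i = cps[i] :: cps.drop (i + 1) := List.drop_eq_getElem_cons h
    have hbody : bodySpec (cps.drop i) = cps[i] :: bodySpec (cps.drop (i + 1)) := by
      cases hk : keyB cps[i] with
      | false => rw [hL, bodySpec_cons_false _ _ hk]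
      | true =>
        have hlen : (aCollect cps i).length = ((cps.drop i).takeWhile keyB).length := by
          rw [hitems, List.length_map]
        have htw : (cps.drop i).takeWhile keyB = cps[i] :: (cps.drop (i + 1)).takeWhile keyB := by
          rw [hL, List.takeWhile_cons_of_pos hk]
        have htw' : (cps.drop (i + 1)).takeWhile keyB = [] := by
          cases hcase : (cps.drop (i + 1)).takeWhile keyB with
          | nil => rfl
          | cons a b =>
            rw [htw, hcase] at hlen
            simp only [List.length_cons] at hlen
            omega
        rw [hL, bodySpec_cons_true _ _ hk, htw', dw_of_tw_nil _ _ htw']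
        rw [show procGroup (true, [cps[i]]) = [cps[i]] from by simp [procGroup]]
        rfl
    rw [ih, hbody]
    simp
  | case3 i result h hp ih =>
    have hk : keyB cps[i] = false := by
      have hb : (dget cps[i] "type" == "paragraph") = false := by
        revert hp; cases (dget cps[i] "type" == "paragraph") <;> simp
      rw [keyB, hb]; rfl
    have hL : cps.drop i = cps[i] :: cps.drop (i + 1) := List.drop_eq_getElem_cons h
    rw [ih, hL, bodySpec_cons_false _ _ hk]
    simp
  | case4 i result h =>
    rw [List.drop_eq_nil_iff.mpr (by omega), bodySpec_nil]
    simp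

-- a true-run's contribution is exactly _flush of it
theorem procGroup_true_eq_flushB (g : List (List (String × String))) :
    procGroup (true, g) = flushB g := by
  simp only [procGroup, flushB, Bool.true_and, decide_eq_true_eq]

-- bodySpec splits off the leading true-run (possibly empty)
theorem bodySpec_split (l : List (List (String × String))) :
    bodySpec l = flushB (l.takeWhile keyB) ++ bodySpec (l.dropWhile keyB) := by
  cases l with
  | nil => simp [flushB]
  | cons c rest =>
    cases hk : keyB c with
    | true =>
      rw [List.takeWhile_cons_of_pos hk, List.dropWhile_cons_of_pos hk,
        bodySpec_cons_true _ _ hk, procGroup_true_eq_flushB]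
    | false =>
      rw [List.takeWhile_cons_of_neg (by simp [hk]), List.dropWhile_cons_of_neg (by simp [hk])]
      simp [flushB]

-- the invariant of B's reverse fold, stated as a foldr over the original list
theorem bFoldr_eq (l : List (List (String × String))) :
    l.foldr
      (fun part (st : List (List (String × String)) × List (List (String × String))) =>
        if keyB part then (part :: st.1, st.2)
        else ([], part :: (flushB st.1 ++ st.2))) ([], [])
      = (l.takeWhile keyB, bodySpec (l.dropWhile keyB)) := by
  induction l with
  | nil => simp [bodySpec_nil]
  | cons c rest ih =>
    rw [List.foldr_cons, ih]
    dsimp only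
    cases hk : keyB c with
    | true =>
      rw [if_pos rfl, List.takeWhile_cons_of_pos hk, List.dropWhile_cons_of_pos hk]
    | false =>
      rw [if_neg (by simp), List.takeWhile_cons_of_neg (by simp [hk]),
        List.dropWhile_cons_of_neg (by simp [hk]), bodySpec_cons_false _ _ hk,
        ← bodySpec_split rest]

-- ===== VERDICT (by name: the statement is the Claim_ definition above) =====
theorem group_pseudo_list_items_spec : Claim_equal_group_pseudo_list_items := by
  intro cps _ _
  unfold Spec_group_pseudo_list_items group_pseudo_list_items group_pseudo_list_items_alt
  by_cases h : cps = []
  · simp [h]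
  · simp only [if_neg h]
    rw [aLoop_eq cps 0 [], List.foldl_reverse, bFoldr_eq, ← bodySpec_split]
    simp
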